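-- pv_equiv track=rewrite | github.com/lookastar/leetcode | 977. Squares of a Sorted Array.py | findMinSquareIndex
-- ===== SOURCE A (Python) =====
-- from typing import List
--
-- def findMinSquareIndex(nums: List[int]) -> int:
--     min_i = 0
--     min = nums[min_i]**2
--
--     for i in range(0,len(nums)):
--         if nums[i]**2 <= min:
--             min_i = i
--             min = nums[min_i]**2
--         else:
--             break   #if values **2 start going up it means the minimum is not there anymore
--
--     return min_i
-- ===== SOURCE B (Python) =====
-- from typing import List
--
-- def findMinSquareIndex(nums: List[int]) -> int:
--     # Single right-to-left pass: remember the leftmost index where the squares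
--     # strictly rise; if they never rise, the answer is the last index.
--     m = len(nums) - 1
--     for i in range(len(nums) - 2, -1, -1):
--         if nums[i + 1] ** 2 > nums[i] ** 2:
--             m = i
--     return m
-- ===== Notes on version B (the rewrite author's own statement) =====
-- stated objective: alternative
-- what changed: A scans forward carrying a running minimum square and breaks at the first increase; B makes one full right-to-left pass with a single accumulator that keeps the leftmost index at which adjacent squares strictly rise (defaulting to the last index), with no running minimum and no early exit.
import Mathlib
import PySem

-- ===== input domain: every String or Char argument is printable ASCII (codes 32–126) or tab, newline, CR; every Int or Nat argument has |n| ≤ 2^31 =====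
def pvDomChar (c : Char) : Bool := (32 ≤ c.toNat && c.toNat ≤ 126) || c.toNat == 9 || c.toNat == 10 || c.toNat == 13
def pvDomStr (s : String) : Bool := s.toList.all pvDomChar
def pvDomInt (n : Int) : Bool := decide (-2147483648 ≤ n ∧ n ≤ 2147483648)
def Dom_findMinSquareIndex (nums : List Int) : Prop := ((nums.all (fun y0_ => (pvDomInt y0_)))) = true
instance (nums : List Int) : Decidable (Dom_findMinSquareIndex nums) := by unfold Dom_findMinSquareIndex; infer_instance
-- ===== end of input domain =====

-- B replaces A's forward scan-with-break (running minimum) by one full right-to-left pass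
-- keeping the leftmost index at which adjacent squares strictly rise (objective: alternative).

-- ===== PORT A =====
-- the for-loop with break: recursion over the remaining range indices, carrying (min_i, min)
def pvALoop (nums : List Int) : List Int → Int → Int → Int
  | [], min_i, _ => min_i
  | i :: rest, min_i, mn =>
      let v := (PySem.List.pyGet? nums i).getD 0   -- i ∈ range(len), so in range; none unreachable
      if v ^ 2 ≤ mn then pvALoop nums rest i (v ^ 2) else min_i

def findMinSquareIndex (nums : List Int) : Int :=
  let min_i : Int := 0
  let mn := ((PySem.List.pyGet? nums min_i).getD 0) ^ 2   -- none = IndexError on [], excluded by Pre_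
  pvALoop nums (PySem.List.pyRange 0 nums.length 1) min_i mn

-- ===== PORT B =====
-- the right-to-left 'for i in range(len(nums)-2, -1, -1)' loop as a foldl over that range
def findMinSquareIndex_alt (nums : List Int) : Int :=
  let m : Int := (nums.length : Int) - 1
  (PySem.List.pyRange ((nums.length : Int) - 2) (-1) (-1)).foldl
    (fun m i =>
      if ((PySem.List.pyGet? nums (i + 1)).getD 0) ^ 2 > ((PySem.List.pyGet? nums i).getD 0) ^ 2
      then i else m) m

-- ===== PRECONDITION & SPEC =====
-- A raises IndexError on the empty list (nums[0]); excluded here.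
def Pre_findMinSquareIndex (nums : List Int) : Prop := nums ≠ []
instance (nums : List Int) : Decidable (Pre_findMinSquareIndex nums) := by
  unfold Pre_findMinSquareIndex; infer_instance

def pvWitness_findMinSquareIndex : List Int := [-3, -2, 2, 4]

def Spec_findMinSquareIndex (nums : List Int) (out : Int) : Prop := out = findMinSquareIndex_alt nums
instance (nums : List Int) (out : Int) : Decidable (Spec_findMinSquareIndex nums out) := by unfold Spec_findMinSquareIndex; infer_instance

-- ===== CLAIM (what is proved, stated in full; the proofs are below) =====
def Claim_equal_findMinSquareIndex : Prop := ∀ (nums : List Int), Dom_findMinSquareIndex nums → Pre_findMinSquareIndex nums → Spec_findMinSquareIndex nums (findMinSquareIndex nums)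

-- ===== LEMMAS AND PROOFS =====

-- the square of the element at index i
def pvSq (nums : List Int) (i : Nat) : Int := (nums.getD i 0) ^ 2

-- the index A's scan returns, as a recursion on the index: first j with sq(j+1) > sq(j), else n-1
def pvFR (nums : List Int) (j : Nat) : Nat :=
  if j + 1 < nums.length ∧ pvSq nums (j + 1) ≤ pvSq nums j then pvFR nums (j + 1) else j
termination_by nums.length - j
decreasing_by omega

theorem pvFR_ge (nums : List Int) (j : Nat) : j ≤ pvFR nums j := by
  fun_induction pvFR with
  | case1 j h ih => omega
  | case2 j h => omega

theorem pvFR_lt (nums : List Int) (j : Nat) (h : j < nums.length) : pvFR nums j < nums.length := by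
  fun_induction pvFR with
  | case1 j h' ih => exact ih (by omega)
  | case2 j h' => omega

theorem pvFR_mono_prefix (nums : List Int) (j : Nat) :
    ∀ i, j ≤ i → i < pvFR nums j → pvSq nums (i + 1) ≤ pvSq nums i := by
  fun_induction pvFR with
  | case1 j h ih =>
      intro i h1 h2
      rcases Nat.eq_or_lt_of_le h1 with rfl | h1'
      · exact h.2
      · exact ih i h1' h2
  | case2 j h =>
      intro i h1 h2
      have := pvFR_ge nums j
      -- pvFR nums j = j here since the if is false; but after fun_induction goal already reduced
      omega

theorem pvFR_stop (nums : List Int) (j : Nat) :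
    pvFR nums j + 1 < nums.length → pvSq nums (pvFR nums j) < pvSq nums (pvFR nums j + 1) := by
  fun_induction pvFR with
  | case1 j h ih => exact ih
  | case2 j h =>
      intro hlt
      rcases not_and_or.mp h with h1 | h2
      · omega
      · omega

-- A's loop equals pvFR
theorem pvALoop_eq_pvFR (nums : List Int) :
    ∀ (m j : Nat), nums.length - (j + 1) = m → j + 1 ≤ nums.length →
    pvALoop nums (PySem.List.pyRange ((j : Int) + 1) nums.length 1) (j : Int)
        (((PySem.List.pyGet? nums (j : Int)).getD 0) ^ 2)
      = (pvFR nums j : Int) := by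
  intro m
  induction m with
  | zero =>
      intro j hm hj
      have hj' : j + 1 = nums.length := by omega
      rw [PySem.List.pyRange_one_eq_nil (by push_cast [← hj']; omega)]
      rw [pvFR]
      rw [if_neg (by omega)]
      simp [pvALoop]
  | succ m ih =>
      intro j hm hj
      have hlt : j + 1 < nums.length := by omega
      have hcast : ((j : Int) + 1) = ((j + 1 : Nat) : Int) := by push_cast; ring
      have h1 : ((PySem.List.pyGet? nums ((j : Int) + 1)).getD 0) = nums.getD (j + 1) 0 := by
        rw [hcast]
        simp only [PySem.List.pyGet?_natCast, List.getD_eq_getElem?_getD]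
      have h2 : ((PySem.List.pyGet? nums (j : Int)).getD 0) = nums.getD j 0 := by
        simp only [PySem.List.pyGet?_natCast, List.getD_eq_getElem?_getD]
      rw [PySem.List.pyRange_one_cons (a := (j : Int) + 1) (b := (nums.length : Int)) (by exact_mod_cast hlt)]
      simp only [pvALoop]
      rw [h1, h2, pvFR]
      by_cases hc : pvSq nums (j + 1) ≤ pvSq nums j
      · rw [if_pos (show nums.getD (j + 1) 0 ^ 2 ≤ nums.getD j 0 ^ 2 from hc),
            if_pos ⟨hlt, hc⟩]
        have H := ih (j + 1) (by omega) (by omega)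
        rw [show ((PySem.List.pyGet? nums ((j + 1 : Nat) : Int)).getD 0) = nums.getD (j + 1) 0 by
              simp only [PySem.List.pyGet?_natCast, List.getD_eq_getElem?_getD]] at H
        push_cast at H ⊢
        exact H
      · rw [if_neg (show ¬ nums.getD (j + 1) 0 ^ 2 ≤ nums.getD j 0 ^ 2 from hc),
            if_neg (by intro hh; exact hc hh.2)]

theorem findMinSquareIndex_eq_pvFR (nums : List Int) (h : nums ≠ []) :
    findMinSquareIndex nums = (pvFR nums 0 : Int) := by
  have hlen : 1 ≤ nums.length := List.length_pos_iff.mpr h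
  unfold findMinSquareIndex
  rw [PySem.List.pyRange_one_cons (by exact_mod_cast hlen)]
  simp only [pvALoop]
  rw [if_pos (le_refl _)]
  have := pvALoop_eq_pvFR nums (nums.length - 1) 0 (by omega) (by omega)
  push_cast at this ⊢
  exact this

-- index access in B's loop body, reduced to List.getD
theorem pvGetNat (nums : List Int) (i : Nat) :
    ((PySem.List.pyGet? nums (i : Int)).getD 0) = nums.getD i 0 := by
  simp only [PySem.List.pyGet?_natCast, List.getD_eq_getElem?_getD]

-- B's right-to-left fold over indices j, j-1, …, 0 returns pvFR nums 0 (the leftmost rise)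
-- whenever it is ≤ j, and otherwise leaves the accumulator
theorem pvBFold_eq (nums : List Int) :
    ∀ (j : Nat) (acc : Int), j + 1 < nums.length →
    (PySem.List.pyRange (j : Int) (-1) (-1)).foldl
      (fun m i =>
        if ((PySem.List.pyGet? nums (i + 1)).getD 0) ^ 2 > ((PySem.List.pyGet? nums i).getD 0) ^ 2
        then i else m) acc
      = if pvFR nums 0 ≤ j then (pvFR nums 0 : Int) else acc := by
  intro j
  induction j with
  | zero =>
      intro acc hj
      rw [PySem.List.pyRange_neg_one_cons (by omega),
          PySem.List.pyRange_neg_one_eq_nil (by omega)]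
      simp only [List.foldl]
      rw [show (((0 : Nat) : Int) + 1) = ((1 : Nat) : Int) from by norm_num,
          pvGetNat, pvGetNat]
      by_cases h0 : pvFR nums 0 = 0
      · have hr := pvFR_stop nums 0 (by omega)
        rw [if_pos (by unfold pvSq at hr; rw [h0] at hr; exact hr), if_pos (by omega), h0]
      · have hnr := pvFR_mono_prefix nums 0 0 (le_refl _) (by omega)
        rw [if_neg (by unfold pvSq at hnr; exact not_lt.mpr hnr), if_neg (by omega)]
  | succ j ih =>
      intro acc hj
      rw [PySem.List.pyRange_neg_one_cons (by push_cast; omega)]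
      rw [List.foldl_cons]
      rw [show (((j : Nat) + 1 : Nat) : Int) + 1 = ((j + 2 : Nat) : Int) from by push_cast; ring,
          pvGetNat, pvGetNat]
      rw [show (((j + 1 : Nat) : Int) - 1) = ((j : Nat) : Int) from by push_cast; ring]
      rw [ih _ (by omega)]
      by_cases h1 : pvFR nums 0 ≤ j
      · rw [if_pos h1, if_pos (by omega)]
      · by_cases h2 : pvFR nums 0 = j + 1
        · have hr := pvFR_stop nums 0 (by omega)
          rw [if_neg h1, if_pos (by unfold pvSq at hr; rw [h2] at hr; exact_mod_cast hr),
              if_pos (by omega), h2]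
        · have hnr := pvFR_mono_prefix nums 0 (j + 1) (Nat.zero_le _) (by omega)
          rw [if_neg h1, if_neg (by unfold pvSq at hnr; exact not_lt.mpr hnr),
              if_neg (by omega)]

theorem alt_eq_pvFR (nums : List Int) (hne : nums ≠ []) :
    findMinSquareIndex_alt nums = (pvFR nums 0 : Int) := by
  have hn : 0 < nums.length := List.length_pos_iff.mpr hne
  unfold findMinSquareIndex_alt
  by_cases h1 : nums.length = 1
  · rw [PySem.List.pyRange_neg_one_eq_nil (by rw [h1]; norm_num)]
    simp only [List.foldl_nil]
    rw [pvFR, if_neg (by omega), h1]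
    rfl
  · have h2 : 2 ≤ nums.length := by omega
    rw [show ((nums.length : Int) - 2) = ((nums.length - 2 : Nat) : Int) from by omega]
    rw [pvBFold_eq nums (nums.length - 2) _ (by omega)]
    have := pvFR_lt nums 0 hn
    by_cases h3 : pvFR nums 0 ≤ nums.length - 2
    · rw [if_pos h3]
    · rw [if_neg h3]
      have : pvFR nums 0 = nums.length - 1 := by omega
      rw [this]
      omega

-- ===== VERDICT =====
theorem findMinSquareIndex_spec : Claim_equal_findMinSquareIndex := by
  intro nums _ hne
  unfold Spec_findMinSquareIndex
  rw [findMinSquareIndex_eq_pvFR nums hne, alt_eq_pvFR nums hne]
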